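-- pv_equiv track=rewrite | github.com/pikalaw/algorithm | jumping_on_array.py | num_ways_to_jump
-- ===== SOURCE A (Python) =====
-- from typing import List
--
-- def num_ways_to_jump(array_length: int, jumps: List[int]):
--   num_ways = [0]*array_length
--   num_ways[0] = 1
--   for i in range(array_length):
--     for jump in jumps:
--       if i - jump >= 0:
--         num_ways[i] += num_ways[i-jump]
--   return num_ways[-1]
-- ===== SOURCE B (Python) =====
-- from typing import List
--
-- def num_ways_to_jump(array_length: int, jumps: List[int]):
--   # demand-driven DP: first find which cells the answer actually depends on
--   # (backward closure from the last cell), then evaluate only those cells.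
--   target = array_length - 1
--   needed = {target}
--   for i in range(target, 0, -1):
--     if i in needed:
--       for jump in jumps:
--         if i - jump >= 0:
--           needed.add(i - jump)
--   ways = {}
--   for i in range(target + 1):
--     if i in needed:
--       total = 1 if i == 0 else 0
--       for jump in jumps:
--         if i - jump >= 0:
--           total += ways[i - jump]
--       ways[i] = total
--   return ways[target]
-- ===== Notes on version B (the rewrite author's own statement) =====
-- stated objective: alternative
-- what changed: Replaces A's full bottom-up DP table over all array cells by a demand-driven evaluation: a backward reachability pass computes the set of cells the answer depends on, then only those cells are evaluated into a dictionary; Pre_ excludes non-positive jumps and array_length < 1: there A raises IndexError (negative jumps, short arrays) or, for a zero jump, A's doubled count is an artefact of its sequential in-place accumulation while B's dict lookup of a not-yet-computed cell raises KeyError.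
-- outside the precondition, e.g. on num_ways_to_jump(2, [0, 1]): A returns 2, B raises KeyError
import Mathlib
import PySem

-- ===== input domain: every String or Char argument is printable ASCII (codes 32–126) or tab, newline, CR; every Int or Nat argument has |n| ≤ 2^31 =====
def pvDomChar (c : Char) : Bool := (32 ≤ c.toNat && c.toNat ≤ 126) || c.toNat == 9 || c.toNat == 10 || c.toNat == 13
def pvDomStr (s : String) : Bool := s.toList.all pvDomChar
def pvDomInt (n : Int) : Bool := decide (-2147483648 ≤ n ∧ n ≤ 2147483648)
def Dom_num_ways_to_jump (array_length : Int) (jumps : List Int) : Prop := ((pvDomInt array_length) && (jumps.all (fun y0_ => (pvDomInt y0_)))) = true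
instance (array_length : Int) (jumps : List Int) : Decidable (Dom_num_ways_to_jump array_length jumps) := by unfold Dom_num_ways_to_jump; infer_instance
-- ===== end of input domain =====

-- B replaces A's full bottom-up DP table by a demand-driven evaluation: a backward
-- reachability pass computes the set of cells the answer depends on, then only those
-- cells are evaluated into a dictionary; equivalence of the return value is proved on
-- Pre_ (array_length ≥ 1 and all jumps positive).

-- ===== PORT A =====
def num_ways_to_jump (array_length : Int) (jumps : List Int) : Int :=
  -- num_ways = [0]*array_length; num_ways[0] = 1
  let init := PySem.List.pySetD (List.replicate array_length.toNat (0 : Int)) 0 1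
  -- for i in range(array_length): for jump in jumps: if i - jump >= 0: num_ways[i] += num_ways[i-jump]
  let fin := (PySem.List.pyRange 0 array_length 1).foldl (fun nw i =>
      jumps.foldl (fun nw jump =>
        if i - jump ≥ 0 then
          PySem.List.pySetD nw i (PySem.List.pyGetD nw i 0 + PySem.List.pyGetD nw (i - jump) 0)
        else nw) nw) init
  -- return num_ways[-1]  (exact on Pre_, where the list is nonempty)
  PySem.List.pyGetD fin (-1) 0

-- ===== PORT B =====
def num_ways_to_jump_alt (array_length : Int) (jumps : List Int) : Int :=
  let target := array_length - 1
  -- needed = {target}; for i in range(target, 0, -1): if i in needed: for jump in jumps: if i - jump >= 0: needed.add(i - jump)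
  let needed := (PySem.List.pyRange target 0 (-1)).foldl (fun s i =>
      if PySem.Set.contains s i then
        jumps.foldl (fun s jump => if i - jump ≥ 0 then PySem.Set.add s (i - jump) else s) s
      else s) (PySem.Set.ofList [target])
  -- ways = {}; for i in range(target + 1): if i in needed: total = 1 if i == 0 else 0; …; ways[i] = total
  let ways := (PySem.List.pyRange 0 (target + 1) 1).foldl (fun w i =>
      if PySem.Set.contains needed i then
        PySem.Dict.insert w i
          (jumps.foldl (fun t jump =>
              if i - jump ≥ 0 then t + PySem.Dict.getD w (i - jump) 0 else t)
            (if i = 0 then (1 : Int) else 0))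
      else w) (PySem.Dict.empty)
  -- return ways[target]  (exact on Pre_, where target is a key; [] raising KeyError ported as getD)
  PySem.Dict.getD ways target 0

-- ===== PRECONDITION & SPEC =====
-- Pre_ excludes inputs with array_length < 1 (A raises IndexError on num_ways[0] = 1; B raises
-- KeyError on ways[target]) and inputs containing a non-positive jump: a negative jump makes A
-- raise IndexError (it reads num_ways[i-jump] past the end) and B raise KeyError (a cell above
-- target is never evaluated), and on a zero jump A's returned count is an accident of its
-- sequential in-place accumulation (num_ways[i] += num_ways[i] mid-update) while B raises
-- KeyError reading ways[i] before it is stored.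
def Pre_num_ways_to_jump (array_length : Int) (jumps : List Int) : Prop :=
  1 ≤ array_length ∧ ∀ j ∈ jumps, 1 ≤ j
instance (array_length : Int) (jumps : List Int) : Decidable (Pre_num_ways_to_jump array_length jumps) := by
  unfold Pre_num_ways_to_jump; infer_instance

def pvWitness_num_ways_to_jump : Int × List Int := (4, [1, 2])

def Spec_num_ways_to_jump (array_length : Int) (jumps : List Int) (out : Int) : Prop := out = num_ways_to_jump_alt array_length jumps
instance (array_length : Int) (jumps : List Int) (out : Int) : Decidable (Spec_num_ways_to_jump array_length jumps out) := by unfold Spec_num_ways_to_jump; infer_instance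

-- ===== CLAIM (what is proved, stated in full; the proofs are below) =====
def Claim_equal_num_ways_to_jump : Prop := ∀ (array_length : Int) (jumps : List Int), Dom_num_ways_to_jump array_length jumps → Pre_num_ways_to_jump array_length jumps → Spec_num_ways_to_jump array_length jumps (num_ways_to_jump array_length jumps)

-- ===== LEMMAS AND PROOFS =====

-- reference table: pvTab jumps k = [W 0, …, W (k-1)] where W is the number of ways to reach a cell
def pvBase (k : Nat) : Int := if k = 0 then 1 else 0

def pvTab (jumps : List Int) : Nat → List Int
  | 0 => []
  | k+1 => pvTab jumps k ++
      [pvBase k + (jumps.map (fun j => if 1 ≤ j ∧ j ≤ (k : Int) then (pvTab jumps k).getD (k - j.toNat) 0 else 0)).sum]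

def pvW (jumps : List Int) (k : Nat) : Int := (pvTab jumps (k+1)).getD k 0

lemma pvTab_length (jumps : List Int) (k : Nat) : (pvTab jumps k).length = k := by
  induction k with
  | zero => rfl
  | succ k ih => simp [pvTab, ih]

lemma pvTab_getD (jumps : List Int) (k p : Nat) (h : p < k) :
    (pvTab jumps k).getD p 0 = pvW jumps p := by
  induction k with
  | zero => omega
  | succ k ih =>
    rcases Nat.lt_or_ge p k with hp | hp
    · rw [pvW] at *
      rw [show pvTab jumps (k+1) = pvTab jumps k ++ _ from rfl,
        List.getD_append _ _ _ _ (by rw [pvTab_length]; exact hp)]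
      exact ih hp
    · have : p = k := by omega
      subst this; rfl

lemma pvW_eq (jumps : List Int) (k : Nat) :
    pvW jumps k = pvBase k +
      (jumps.map (fun j => if 1 ≤ j ∧ j ≤ (k : Int) then pvW jumps (k - j.toNat) else 0)).sum := by
  rw [pvW, show pvTab jumps (k+1) = pvTab jumps k ++ _ from rfl,
    List.getD_append_right _ _ _ _ (by rw [pvTab_length])]
  rw [pvTab_length, Nat.sub_self]
  simp only [List.getD_cons_zero]
  congr 1
  apply congrArg
  apply List.map_congr_left
  intro j hj
  by_cases h : 1 ≤ j ∧ j ≤ (k : Int)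
  · simp only [h]
    exact pvTab_getD jumps k (k - j.toNat) (by omega)
  · simp [h]

lemma pv_set_map_range (f : Nat → Int) (n t : Nat) (v : Int) (ht : t < n) :
    ((List.range n).map f).set t v = (List.range n).map (fun k => if k = t then v else f k) := by
  apply List.ext_getElem
  · simp
  · intro i h1 h2
    simp only [List.getElem_set, List.getElem_map, List.getElem_range]
    by_cases h : i = t
    · subst h; simp
    · rw [if_neg (fun h' => h h'.symm), if_neg h]

lemma pv_getD_set_self (l : List Int) (i : Nat) (v : Int) (hi : i < l.length) :
    (l.set i v).getD i 0 = v := by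
  simp [List.getD_eq_getElem?_getD, hi]

lemma pv_getD_set_ne (l : List Int) (i p : Nat) (v : Int) (h : p ≠ i) :
    (l.set i v).getD p 0 = l.getD p 0 := by
  simp [List.getD_eq_getElem?_getD, List.getElem?_set_ne (by omega : i ≠ p)]

-- fold an invariant along range(n)
lemma pv_foldl_pyRange_inv {α : Type} (F : α → Int → α) (P : Nat → α) (n : Nat)
    (h : ∀ i : Nat, i < n → F (P i) (i : Int) = P (i+1)) :
    (PySem.List.pyRange 0 (n : Int) 1).foldl F (P 0) = P n := by
  induction n with
  | zero => rw [PySem.List.pyRange_one_eq_nil (by norm_num)]; rfl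
  | succ n ih =>
    have : ((n : Int) + 1) = ((n + 1 : Nat) : Int) := by push_cast; ring
    rw [← this, PySem.List.pyRange_one_succ_right (by positivity), List.foldl_append]
    rw [ih (fun i hi => h i (by omega))]
    exact h n (by omega)

-- ---- inner loop of A (pull): processing cell i adds the predecessor sum into position i ----
lemma pv_inner_pull (jumps : List Int) (i : Nat) (hj : ∀ j ∈ jumps, 1 ≤ j) :
    ∀ l : List Int, i < l.length →
    jumps.foldl (fun nw jump => if (i : Int) - jump ≥ 0 then
        PySem.List.pySetD nw (i : Int)
          (PySem.List.pyGetD nw (i : Int) 0 + PySem.List.pyGetD nw ((i : Int) - jump) 0)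
      else nw) l
    = l.set i (l.getD i 0 +
        (jumps.map (fun j => if 1 ≤ j ∧ j ≤ (i : Int) then l.getD (i - j.toNat) 0 else 0)).sum) := by
  induction jumps with
  | nil =>
    intro l hi
    simp [List.getD_eq_getElem?_getD, List.getElem?_eq_getElem hi, List.set_getElem_self]
  | cons j rest ih =>
    intro l hi
    have hj1 : 1 ≤ j := hj j (by simp)
    have hrest : ∀ j' ∈ rest, 1 ≤ j' := fun j' h' => hj j' (by simp [h'])
    by_cases hcond : (i : Int) - j ≥ 0
    · have hji : j ≤ (i : Int) := by omega
      have htn : ((i : Int) - j).toNat = i - j.toNat := by omega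
      rw [List.foldl_cons]
      rw [if_pos hcond, PySem.List.pySetD_of_nonneg _ _ (Int.natCast_nonneg i),
        PySem.List.pyGetD_of_nonneg _ _ (Int.natCast_nonneg i),
        PySem.List.pyGetD_of_nonneg _ _ hcond, htn, Int.toNat_natCast]
      rw [ih hrest _ (by simpa using hi)]
      rw [List.set_set]
      rw [pv_getD_set_self _ _ _ hi]
      congr 1
      rw [List.map_cons, List.sum_cons, if_pos ⟨hj1, hji⟩, add_assoc]
      congr 1
      congr 1
      congr 1
      apply List.map_congr_left
      intro j' hj'
      by_cases hc' : 1 ≤ j' ∧ j' ≤ (i : Int)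
      · rw [if_pos hc', if_pos hc', pv_getD_set_ne _ _ _ _ (by omega)]
      · rw [if_neg hc', if_neg hc']
    · simp only [List.foldl_cons, if_neg hcond]
      rw [ih hrest _ hi]
      congr 2
      rw [List.map_cons, List.sum_cons, if_neg (by omega), zero_add]

-- ---- invariant state of A's outer loop ----
def pvPull (jumps : List Int) (n i : Nat) : List Int :=
  (List.range n).map (fun k => if k < i then pvW jumps k else pvBase k)

lemma pv_init_pull (jumps : List Int) (n : Nat) :
    (List.replicate n (0 : Int)).set 0 1 = pvPull jumps n 0 := by
  apply List.ext_getElem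
  · simp [pvPull]
  · intro k h1 h2
    simp only [pvPull, List.getElem_map, List.getElem_range, List.getElem_set]
    by_cases hk : k = 0 <;> simp [pvBase, hk, Ne.symm, List.getElem_replicate]

lemma pv_pull_step (jumps : List Int) (n i : Nat) (hj : ∀ j ∈ jumps, 1 ≤ j) (hi : i < n) :
    jumps.foldl (fun nw jump => if (i : Int) - jump ≥ 0 then
        PySem.List.pySetD nw (i : Int)
          (PySem.List.pyGetD nw (i : Int) 0 + PySem.List.pyGetD nw ((i : Int) - jump) 0)
      else nw) (pvPull jumps n i)
    = pvPull jumps n (i + 1) := by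
  rw [pv_inner_pull jumps i hj (pvPull jumps n i) (by simp [pvPull, hi])]
  have hgd : ∀ p, p < n → (pvPull jumps n i).getD p 0 = (if p < i then pvW jumps p else pvBase p) := by
    intro p hp
    exact PySem.List.getD_map_range _ _ _ _ hp
  rw [hgd i hi, if_neg (by omega)]
  have hsum : (jumps.map (fun j => if 1 ≤ j ∧ j ≤ (i : Int) then (pvPull jumps n i).getD (i - j.toNat) 0 else 0)).sum
      = (jumps.map (fun j => if 1 ≤ j ∧ j ≤ (i : Int) then pvW jumps (i - j.toNat) else 0)).sum := by
    congr 1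
    apply List.map_congr_left
    intro j _
    by_cases hc : 1 ≤ j ∧ j ≤ (i : Int)
    · rw [if_pos hc, if_pos hc, hgd _ (by omega), if_pos (by omega)]
    · rw [if_neg hc, if_neg hc]
  rw [hsum, ← pvW_eq]
  rw [pvPull, pv_set_map_range _ _ _ _ hi]
  apply List.map_congr_left
  intro k hk
  by_cases hk' : k = i
  · subst hk'; rw [if_pos rfl, if_pos (by omega)]
  · rw [if_neg hk']
    by_cases hlt : k < i
    · rw [if_pos hlt, if_pos (by omega)]
    · rw [if_neg hlt, if_neg (by omega)]

-- A's result is pvW (n-1)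
lemma pv_A_eq (jumps : List Int) (n : Nat) (hn : 1 ≤ n) (hj : ∀ j ∈ jumps, 1 ≤ j) :
    PySem.List.pyGetD
      ((PySem.List.pyRange 0 (n : Int) 1).foldl (fun nw i =>
        jumps.foldl (fun nw jump =>
          if i - jump ≥ 0 then
            PySem.List.pySetD nw i (PySem.List.pyGetD nw i 0 + PySem.List.pyGetD nw (i - jump) 0)
          else nw) nw) (pvPull jumps n 0)) (-1) 0
    = pvW jumps (n - 1) := by
  rw [pv_foldl_pyRange_inv _ (pvPull jumps n) n (fun i hi => pv_pull_step jumps n i hj hi)]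
  rw [pvPull, show n = (n - 1) + 1 by omega, List.range_succ, List.map_append]
  simp only [List.map_cons, List.map_nil]
  rw [PySem.List.pyGetD_neg_one_append_singleton]
  rw [if_pos (by omega)]
  congr 1

-- ---- B, phase 1: membership after the inner add-loop ----
lemma pv_inner_add (jumps : List Int) (i : Int) :
    ∀ (S : PySem.Set Int) (x : Int),
    (x ∈ jumps.foldl (fun s jump => if i - jump ≥ 0 then PySem.Set.add s (i - jump) else s) S)
    ↔ (x ∈ S ∨ ∃ j ∈ jumps, i - j ≥ 0 ∧ x = i - j) := by
  induction jumps with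
  | nil => intro S x; simp
  | cons j rest ih =>
    intro S x
    rw [List.foldl_cons]
    by_cases hc : i - j ≥ 0
    · rw [if_pos hc, ih]
      simp only [PySem.Set.mem_add, List.mem_cons]
      constructor
      · rintro (⟨hS | hx⟩ | ⟨j', hj', h1, h2⟩)
        · exact Or.inl hS
        · exact Or.inr ⟨j, Or.inl rfl, hc, hx⟩
        · exact Or.inr ⟨j', Or.inr hj', h1, h2⟩
      · rintro (hS | ⟨j', hj' | hj', h1, h2⟩)
        · exact Or.inl (Or.inl hS)
        · exact Or.inl (Or.inr (by rw [hj'] at h2; exact h2))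
        · exact Or.inr ⟨j', hj', h1, h2⟩
    · rw [if_neg hc, ih]
      constructor
      · rintro (hS | ⟨j', hj', h1, h2⟩)
        · exact Or.inl hS
        · exact Or.inr ⟨j', List.mem_cons_of_mem _ hj', h1, h2⟩
      · rintro (hS | ⟨j', hj', h1, h2⟩)
        · exact Or.inl hS
        · rcases List.mem_cons.mp hj' with rfl | hj''
          · exact absurd h1 hc
          · exact Or.inr ⟨j', hj'', h1, h2⟩

-- ---- B, phase 1: the countdown loop produces a predecessor-closed set ----
lemma pv_phase1 (jumps : List Int) (hj : ∀ j ∈ jumps, 1 ≤ j) :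
    ∀ (m : Nat) (S : PySem.Set Int),
    (∀ k ∈ S, (m : Int) < k → ∀ j ∈ jumps, k - j ≥ 0 → (k - j) ∈ S) →
    (∀ x ∈ S,
        x ∈ (PySem.List.pyRange (m : Int) 0 (-1)).foldl (fun s i =>
          if PySem.Set.contains s i then
            jumps.foldl (fun s jump => if i - jump ≥ 0 then PySem.Set.add s (i - jump) else s) s
          else s) S) ∧
    (∀ k ∈ (PySem.List.pyRange (m : Int) 0 (-1)).foldl (fun s i =>
          if PySem.Set.contains s i then
            jumps.foldl (fun s jump => if i - jump ≥ 0 then PySem.Set.add s (i - jump) else s) s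
          else s) S,
      0 < k → ∀ j ∈ jumps, k - j ≥ 0 →
        (k - j) ∈ (PySem.List.pyRange (m : Int) 0 (-1)).foldl (fun s i =>
          if PySem.Set.contains s i then
            jumps.foldl (fun s jump => if i - jump ≥ 0 then PySem.Set.add s (i - jump) else s) s
          else s) S) ∧
    (∀ x ∈ (PySem.List.pyRange (m : Int) 0 (-1)).foldl (fun s i =>
          if PySem.Set.contains s i then
            jumps.foldl (fun s jump => if i - jump ≥ 0 then PySem.Set.add s (i - jump) else s) s
          else s) S, x ∈ S ∨ x < (m : Int)) := by
  intro m
  induction m with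
  | zero =>
    intro S hS
    rw [PySem.List.pyRange_neg_one_eq_nil (by norm_num)]
    exact ⟨fun x hx => hx, fun k hk h0 => hS k hk (by omega), fun x hx => Or.inl hx⟩
  | succ m ih =>
    intro S hS
    have hcons : PySem.List.pyRange ((m + 1 : Nat) : Int) 0 (-1)
        = ((m + 1 : Nat) : Int) :: PySem.List.pyRange (((m + 1 : Nat) : Int) - 1) 0 (-1) :=
      PySem.List.pyRange_neg_one_cons (by positivity)
    have hstep : (((m + 1 : Nat) : Int) - 1) = (m : Int) := by push_cast; ring
    rw [hcons, hstep, List.foldl_cons]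
    by_cases hmem : PySem.Set.contains S ((m + 1 : Nat) : Int)
    · rw [if_pos hmem]
      have hmem' : ((m + 1 : Nat) : Int) ∈ S := (by simpa [PySem.Set.contains_eq_listContains] using hmem)
      set S1 := jumps.foldl (fun s jump =>
        if ((m + 1 : Nat) : Int) - jump ≥ 0 then PySem.Set.add s (((m + 1 : Nat) : Int) - jump) else s) S with hS1
      have hS1mem : ∀ x, x ∈ S1 ↔ x ∈ S ∨ ∃ j ∈ jumps, ((m + 1 : Nat) : Int) - j ≥ 0 ∧ x = ((m + 1 : Nat) : Int) - j :=
        fun x => pv_inner_add jumps _ S x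
      have hclosed1 : ∀ k ∈ S1, (m : Int) < k → ∀ j ∈ jumps, k - j ≥ 0 → (k - j) ∈ S1 := by
        intro k hk hmk j hjj hkj
        rcases (hS1mem k).mp hk with hkS | ⟨j', hj', h1, h2⟩
        · by_cases hkm1 : k = ((m + 1 : Nat) : Int)
          · subst hkm1
            exact (hS1mem _).mpr (Or.inr ⟨j, hjj, hkj, rfl⟩)
          · have : ((m + 1 : Nat) : Int) < k := by push_cast at *; omega
            exact (hS1mem _).mpr (Or.inl (hS k hkS this j hjj hkj))
        · exfalso
          have := hj j' hj'
          push_cast at *; omega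
      obtain ⟨ha, hb, hc⟩ := ih S1 hclosed1
      refine ⟨fun x hx => ha x ((hS1mem x).mpr (Or.inl hx)), hb, ?_⟩
      intro x hx
      rcases hc x hx with hx1 | hx2
      · rcases (hS1mem x).mp hx1 with hxS | ⟨j', hj', h1, h2⟩
        · exact Or.inl hxS
        · have := hj j' hj'
          right; push_cast at *; omega
      · right; push_cast at *; omega
    · rw [if_neg hmem]
      have hclosed1 : ∀ k ∈ S, (m : Int) < k → ∀ j ∈ jumps, k - j ≥ 0 → (k - j) ∈ S := by
        intro k hk hmk j hjj hkj
        by_cases hkm1 : k = ((m + 1 : Nat) : Int)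
        · exfalso; exact hmem (by simpa [PySem.Set.contains_eq_listContains, ← hkm1] using hk)
        · exact hS k hk (by push_cast at *; omega) j hjj hkj
      obtain ⟨ha, hb, hc⟩ := ih S hclosed1
      refine ⟨ha, hb, ?_⟩
      intro x hx
      rcases hc x hx with hx1 | hx2
      · exact Or.inl hx1
      · right; push_cast at *; omega

-- ---- B, phase 2: the inner sum-loop ----
lemma pv_inner_sum (jumps : List Int) (i : Int) (w : PySem.Dict Int Int) :
    ∀ t0 : Int,
    jumps.foldl (fun t jump => if i - jump ≥ 0 then t + PySem.Dict.getD w (i - jump) 0 else t) t0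
    = t0 + (jumps.map (fun j => if i - j ≥ 0 then PySem.Dict.getD w (i - j) 0 else 0)).sum := by
  induction jumps with
  | nil => intro t0; simp
  | cons j rest ih =>
    intro t0
    rw [List.foldl_cons, List.map_cons, List.sum_cons]
    by_cases hc : i - j ≥ 0
    · rw [if_pos hc, if_pos hc, ih]; ring
    · rw [if_neg hc, if_neg hc, ih]; ring

-- one ascending step of phase 2
lemma pv_phase2_step (jumps : List Int) (hj : ∀ j ∈ jumps, 1 ≤ j) (N : PySem.Set Int)
    (hN : ∀ k ∈ N, 0 < k → ∀ j ∈ jumps, k - j ≥ 0 → (k - j) ∈ N)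
    (m : Nat) (w : PySem.Dict Int Int)
    (hw : ∀ k : Nat, (k : Int) < (m : Int) → (k : Int) ∈ N → w.get? (k : Int) = some (pvW jumps k)) :
    ∀ k : Nat, (k : Int) < ((m : Int) + 1) → (k : Int) ∈ N →
      ((if PySem.Set.contains N (m : Int) then
          PySem.Dict.insert w (m : Int)
            (jumps.foldl (fun t jump =>
                if (m : Int) - jump ≥ 0 then t + PySem.Dict.getD w ((m : Int) - jump) 0 else t)
              (if (m : Int) = 0 then (1 : Int) else 0))
        else w)).get? (k : Int) = some (pvW jumps k) := by
  intro k hk hkN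
  by_cases hkm : k = m
  · subst hkm
    rw [if_pos (by simpa [PySem.Set.contains_eq_listContains] using hkN), PySem.Dict.get?_insert_self]
    congr 1
    rw [pv_inner_sum]
    have hval : ∀ j ∈ jumps, (k : Int) - j ≥ 0 →
        PySem.Dict.getD w ((k : Int) - j) 0 = pvW jumps (k - j.toNat) := by
      intro j hjj hcond
      have hj1 := hj j hjj
      have hcast : (k : Int) - j = ((k - j.toNat : Nat) : Int) := by omega
      have hlt : ((k - j.toNat : Nat) : Int) < (k : Int) := by omega
      have hmem : ((k - j.toNat : Nat) : Int) ∈ N := by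
        rw [← hcast]; exact hN _ hkN (by omega) j hjj hcond
      rw [hcast, PySem.Dict.getD_eq_get?_getD, hw _ hlt hmem]
      rfl
    have hsum : (jumps.map (fun j => if (k : Int) - j ≥ 0 then PySem.Dict.getD w ((k : Int) - j) 0 else 0)).sum
        = (jumps.map (fun j => if 1 ≤ j ∧ j ≤ (k : Int) then pvW jumps (k - j.toNat) else 0)).sum := by
      congr 1
      apply List.map_congr_left
      intro j hjj
      have hj1 := hj j hjj
      by_cases hc : (k : Int) - j ≥ 0
      · rw [if_pos hc, if_pos ⟨hj1, by omega⟩, hval j hjj hc]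
      · rw [if_neg hc, if_neg (by omega)]
    rw [hsum]
    have hbase : (if (k : Int) = 0 then (1 : Int) else 0) = pvBase k := by
      rw [pvBase]
      by_cases hk0 : k = 0
      · subst hk0; norm_num
      · rw [if_neg (by exact_mod_cast hk0), if_neg hk0]
    rw [hbase, ← pvW_eq]
  · have hlt : (k : Int) < (m : Int) := by omega
    by_cases hNm : PySem.Set.contains N (m : Int)
    · rw [if_pos hNm, PySem.Dict.get?_insert, if_neg (by exact_mod_cast hkm), hw k hlt hkN]
    · rw [if_neg hNm, hw k hlt hkN]

-- B's result is pvW (n-1)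
lemma pv_B_eq (jumps : List Int) (n : Nat) (hn : 1 ≤ n) (hj : ∀ j ∈ jumps, 1 ≤ j)
    (N : PySem.Set Int) (htN : (((n - 1 : Nat)) : Int) ∈ N)
    (hN : ∀ k ∈ N, 0 < k → ∀ j ∈ jumps, k - j ≥ 0 → (k - j) ∈ N) :
    PySem.Dict.getD
      ((PySem.List.pyRange 0 ((((n - 1 : Nat)) : Int) + 1) 1).foldl (fun w i =>
        if PySem.Set.contains N i then
          PySem.Dict.insert w i
            (jumps.foldl (fun t jump =>
                if i - jump ≥ 0 then t + PySem.Dict.getD w (i - jump) 0 else t)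
              (if i = 0 then (1 : Int) else 0))
        else w) PySem.Dict.empty) (((n - 1 : Nat)) : Int) 0
    = pvW jumps (n - 1) := by
  -- prove the loop invariant by induction on the range length
  have main : ∀ (m : Nat),
      ∀ k : Nat, (k : Int) < (m : Int) → (k : Int) ∈ N →
        ((PySem.List.pyRange 0 (m : Int) 1).foldl (fun w i =>
          if PySem.Set.contains N i then
            PySem.Dict.insert w i
              (jumps.foldl (fun t jump =>
                  if i - jump ≥ 0 then t + PySem.Dict.getD w (i - jump) 0 else t)
                (if i = 0 then (1 : Int) else 0))
          else w) PySem.Dict.empty).get? (k : Int) = some (pvW jumps k) := by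
    intro m
    induction m with
    | zero =>
      intro k hk _
      omega
    | succ m ih =>
      have hcast : ((m + 1 : Nat) : Int) = (m : Int) + 1 := by push_cast; ring
      rw [hcast, PySem.List.pyRange_one_succ_right (by positivity), List.foldl_append, List.foldl_cons, List.foldl_nil]
      intro k hk hkN
      exact pv_phase2_step jumps hj N hN m _ ih k (by exact_mod_cast hk) hkN
  have hfin := main n (n - 1) (by omega) htN
  have hcast2 : ((((n - 1 : Nat)) : Int) + 1) = (n : Int) := by omega
  rw [hcast2, PySem.Dict.getD_eq_get?_getD, hfin]
  rfl

-- ===== VERDICT (by name: the statement is the Claim_ definition above) =====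
theorem num_ways_to_jump_spec : Claim_equal_num_ways_to_jump := by
  intro array_length jumps _ hpre
  obtain ⟨h1, hj⟩ := hpre
  set n := array_length.toNat with hn
  have harr : array_length = (n : Int) := by omega
  have hn1 : 1 ≤ n := by omega
  unfold Spec_num_ways_to_jump num_ways_to_jump num_ways_to_jump_alt
  simp only [harr]
  -- A side
  rw [PySem.List.pySetD_of_nonneg _ _ (le_refl (0:Int)),
    show ((0:Int)).toNat = 0 from rfl, Int.toNat_natCast]
  rw [pv_init_pull jumps n, pv_A_eq jumps n hn1 hj]
  -- B side
  have htgt : (n : Int) - 1 = (((n - 1 : Nat)) : Int) := by omega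
  obtain ⟨ha, hb, _⟩ := pv_phase1 jumps hj (n - 1)
      (PySem.Set.ofList [(((n - 1 : Nat)) : Int)])
      (by
        intro k hk hmk
        exfalso
        have : k = (((n - 1 : Nat)) : Int) := by
          simpa [PySem.Set.mem_ofList] using hk
        omega)
  rw [htgt]
  rw [pv_B_eq jumps n hn1 hj _ (ha _ (by simp [PySem.Set.mem_ofList])) hb]
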